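-- pv_equiv track=rewrite | github.com/microsoft/msticpy | tools/toollib/import_analyzer.py | _filter_exclusions
-- ===== SOURCE A (Python) =====
-- from typing import Any, DefaultDict, Dict, Generator, List, Optional, Set, Tuple
--
-- ImportDict = Dict[str, Dict[str, List[str]]]
--
-- def _filter_exclusions(
--     module_imports: ImportDict,
--     excl_prefixes: List[str],
-- ) -> ImportDict:
--     """Remove any imports that start with items in `excl_prefixes`."""
--     return {
--         mod: {
--             imp: tgts
--             for imp, tgts in imports.items()
--             if not any(exc for exc in excl_prefixes if imp.startswith(exc))
--         }
--         for mod, imports in module_imports.items()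
--         if any(
--             imp
--             for imp in imports
--             if not any(exc for exc in excl_prefixes if imp.startswith(exc))
--         )
--     }
-- ===== SOURCE B (Python) =====
-- from typing import Dict, List
--
-- ImportDict = Dict[str, Dict[str, List[str]]]
--
-- def _filter_exclusions(
--     module_imports: ImportDict,
--     excl_prefixes: List[str],
-- ) -> ImportDict:
--     """Remove any imports that start with items in `excl_prefixes`."""
--     # Index the (non-empty) exclusion prefixes once into buckets keyed by
--     # length; an import is excluded iff one of its own prefixes imp[:k] is in
--     # the bucket of length k.  This replaces the per-import scan over all
--     # prefixes by one hashed set lookup per distinct prefix length.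
--     by_len: Dict[int, set] = {}
--     for exc in excl_prefixes:
--         if exc:
--             by_len.setdefault(len(exc), set()).add(exc)
--     result: ImportDict = {}
--     for mod, imports in module_imports.items():
--         kept = {imp: tgts for imp, tgts in imports.items()
--                 if not any(imp[:k] in s for k, s in by_len.items())}
--         if any(kept):
--             result[mod] = kept
--     return result
-- ===== Notes on version B (the rewrite author's own statement) =====
-- stated objective: faster
-- what changed: Replaces A's per-import scan over every exclusion prefix (done twice per module by the double-filtered nested comprehension) with a pre-built index: the non-empty prefixes are bucketed once into a dict of sets keyed by length, and each import is tested by one hashed set lookup of its own k-prefix per distinct prefix length; the filtered dict is computed once per module.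
import Mathlib
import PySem

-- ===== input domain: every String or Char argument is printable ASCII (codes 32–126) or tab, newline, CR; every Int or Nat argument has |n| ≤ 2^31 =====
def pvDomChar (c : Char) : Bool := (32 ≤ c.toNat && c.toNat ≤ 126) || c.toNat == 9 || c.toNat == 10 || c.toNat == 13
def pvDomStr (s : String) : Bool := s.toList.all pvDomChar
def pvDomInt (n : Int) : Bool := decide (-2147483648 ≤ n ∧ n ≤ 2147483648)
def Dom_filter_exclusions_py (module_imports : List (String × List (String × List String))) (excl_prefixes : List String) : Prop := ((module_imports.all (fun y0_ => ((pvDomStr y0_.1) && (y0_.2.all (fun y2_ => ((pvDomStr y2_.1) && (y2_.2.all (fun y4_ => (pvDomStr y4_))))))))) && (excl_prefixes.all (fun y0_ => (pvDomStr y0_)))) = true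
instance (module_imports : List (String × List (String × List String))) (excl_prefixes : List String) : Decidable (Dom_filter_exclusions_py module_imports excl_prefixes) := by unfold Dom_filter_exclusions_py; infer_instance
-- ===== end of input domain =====

-- B indexes the non-empty exclusion prefixes once into length-keyed buckets of
-- sets and tests each import by set lookups of its own prefixes, instead of
-- A's double-filtered comprehension scanning every prefix per import (objective: faster).

-- ===== PORT A =====
def filter_exclusions_py (module_imports : List (String × List (String × List String))) (excl_prefixes : List String) : List (String × List (String × List String)) :=
  -- dict comprehension: {mod: {imp: tgts for ... if not any(...)} for mod, imports in ... if any(imp for imp in imports if not any(...))}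
  -- NB 'any(exc for exc in ...)' / 'any(imp for imp in ...)' test truthiness: an empty string does not count
  (module_imports.filter (fun p =>
      p.2.any (fun q =>
        (!(excl_prefixes.any (fun exc => PySem.Str.startswith q.1 exc && !(exc == "")))) && !(q.1 == "")))).map
    (fun p => (p.1,
      p.2.filter (fun q =>
        !(excl_prefixes.any (fun exc => PySem.Str.startswith q.1 exc && !(exc == ""))))))

-- ===== PORT B =====
def filter_exclusions_py_alt (module_imports : List (String × List (String × List String))) (excl_prefixes : List String) : List (String × List (String × List String)) :=
  -- by_len: for exc in excl_prefixes: if exc: by_len.setdefault(len(exc), set()).add(exc)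
  let byLen : PySem.Dict Int (PySem.Set String) :=
    excl_prefixes.foldl (fun d exc =>
      if exc == "" then d
      else d.modify (PySem.Str.len exc) [] (fun s => PySem.Set.add s exc)) PySem.Dict.empty
  -- for mod, imports in module_imports.items(): kept = {...}; if any(kept): result[mod] = kept
  module_imports.foldl (fun result m =>
    let kept := m.2.filter (fun q =>
      !(byLen.items.any (fun kv => PySem.Set.contains kv.2 (PySem.Str.slice q.1 none (some kv.1)))))
    if kept.any (fun q => !(q.1 == "")) then result ++ [(m.1, kept)] else result) []

-- ===== PRECONDITION & SPEC =====
def Spec_filter_exclusions_py (module_imports : List (String × List (String × List String))) (excl_prefixes : List String) (out : List (String × List (String × List String))) : Prop := out = filter_exclusions_py_alt module_imports excl_prefixes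
instance (module_imports : List (String × List (String × List String))) (excl_prefixes : List String) (out : List (String × List (String × List String))) : Decidable (Spec_filter_exclusions_py module_imports excl_prefixes out) := by unfold Spec_filter_exclusions_py; infer_instance

-- ===== CLAIM (what is proved, stated in full; the proofs are below) =====
def Claim_equal_filter_exclusions_py : Prop := ∀ (module_imports : List (String × List (String × List String))) (excl_prefixes : List String), Dom_filter_exclusions_py module_imports excl_prefixes → Spec_filter_exclusions_py module_imports excl_prefixes (filter_exclusions_py module_imports excl_prefixes)

-- ===== LEMMAS AND PROOFS =====

-- the bucket-building loop equals building from the pre-filtered prefix list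
lemma pv_build_eq (ep : List String) :
    ep.foldl (fun d exc =>
        if exc == "" then d
        else d.modify (PySem.Str.len exc) [] (fun s => PySem.Set.add s exc)) PySem.Dict.empty
    = (ep.filter (fun e => !(e == ""))).foldl
        (fun d exc => d.modify (PySem.Str.len exc) [] (fun s => PySem.Set.add s exc)) PySem.Dict.empty := by
  rw [List.foldl_filter]
  congr 1
  funext d exc
  by_cases h : exc = "" <;> simp [h]

-- membership in a length bucket of the built dict
lemma pv_mem_getD (l : List String) (d : PySem.Dict Int (PySem.Set String)) (k : Int) (e : String) :
    e ∈ (l.foldl (fun d exc => d.modify (PySem.Str.len exc) [] (fun s => PySem.Set.add s exc)) d).getD k []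
      ↔ e ∈ d.getD k [] ∨ (e ∈ l ∧ PySem.Str.len e = k) := by
  induction l generalizing d with
  | nil => simp
  | cons exc t ih =>
    simp only [List.foldl_cons, ih]
    rw [PySem.Dict.getD_modify]
    by_cases hk : k = PySem.Str.len exc
    · subst hk
      rw [if_pos rfl]
      simp only [PySem.Set.mem_add, List.mem_cons]
      constructor
      · rintro ((h | he) | ⟨ht, hl⟩)
        · exact Or.inl h
        · exact Or.inr ⟨Or.inl he, by rw [he]⟩
        · exact Or.inr ⟨Or.inr ht, hl⟩
      · rintro (h | ⟨(he | ht), hl⟩)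
        · exact Or.inl (Or.inl h)
        · exact Or.inl (Or.inr he)
        · exact Or.inr ⟨ht, hl⟩
    · rw [if_neg hk]
      simp only [List.mem_cons]
      constructor
      · rintro (h | ⟨ht, hl⟩)
        · exact Or.inl h
        · exact Or.inr ⟨Or.inr ht, hl⟩
      · rintro (h | ⟨(he | ht), hl⟩)
        · exact Or.inl h
        · exact (hk (he ▸ hl).symm).elim
        · exact Or.inr ⟨ht, hl⟩

-- s[:len(e)] == e  is exactly  s.startswith(e)
lemma pv_slice_eq_iff (imp e : String) :
    PySem.Str.slice imp none (some (PySem.Str.len e)) = e ↔ PySem.Str.startswith imp e = true := by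
  have hs : (PySem.Str.slice imp none (some (PySem.Str.len e))).toList
      = imp.toList.take e.toList.length := by
    simp [pysem, PySem.Str.len_eq]
  rw [PySem.Str.startswith_eq, PySem.Chars.startswith_iff, List.prefix_iff_eq_take]
  constructor
  · intro h
    have h' := congrArg String.toList h
    rw [hs] at h'
    exact h'.symm
  · intro h
    apply String.ext
    rw [hs, ← h]

-- the bucket test computes A's per-import exclusion condition
lemma pv_pred (ep : List String) (imp : String) :
    ((ep.foldl (fun d exc =>
        if exc == "" then d
        else d.modify (PySem.Str.len exc) [] (fun s => PySem.Set.add s exc)) PySem.Dict.empty).items.any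
      (fun kv => PySem.Set.contains kv.2 (PySem.Str.slice imp none (some kv.1))))
    = ep.any (fun exc => PySem.Str.startswith imp exc && !(exc == "")) := by
  rw [pv_build_eq]
  have hkeys : ((ep.filter (fun e => !(e == ""))).foldl
      (fun d exc => d.modify (PySem.Str.len exc) [] (fun s => PySem.Set.add s exc)) PySem.Dict.empty).keys
      = PySem.Set.ofList ((ep.filter (fun e => !(e == ""))).map PySem.Str.len) := by
    rw [PySem.Dict.keys_foldl_modify_key (ep.filter (fun e => !(e == ""))) PySem.Str.len []
        (fun _ exc s => PySem.Set.add s exc) PySem.Dict.empty]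
    exact PySem.Set.update_nil_left _
  rw [PySem.Dict.items_eq_map_keys _ (hkeys ▸ PySem.Set.nodup_ofList _) [], hkeys]
  rw [Bool.eq_iff_iff]
  simp only [List.any_map, Function.comp_def, List.any_eq_true, PySem.Set.mem_ofList,
    List.mem_map, List.mem_filter, PySem.Set.contains, List.contains_iff_mem, pv_mem_getD,
    PySem.Dict.getD_empty, List.not_mem_nil, false_or, Bool.and_eq_true, Bool.not_eq_true']
  constructor
  · rintro ⟨k, -, hmem, hlen⟩
    exact ⟨_, hmem.1, (pv_slice_eq_iff imp _).mp (by rw [hlen]), hmem.2⟩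
  · rintro ⟨exc, hexc, hsw, hne⟩
    have heq := (pv_slice_eq_iff imp exc).mpr hsw
    exact ⟨PySem.Str.len exc, ⟨exc, ⟨hexc, hne⟩, rfl⟩,
      ⟨by rw [heq]; exact hexc, by rw [heq]; exact hne⟩, by rw [heq]⟩

-- the result-building loop with an abstract exclusion test E
lemma pv_loop (E : String → Bool) (mi : List (String × List (String × List String)))
    (acc : List (String × List (String × List String))) :
    mi.foldl (fun result m =>
      if (m.2.filter (fun q => !(E q.1))).any (fun q => !(q.1 == ""))
      then result ++ [(m.1, m.2.filter (fun q => !(E q.1)))] else result) acc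
    = acc ++ (mi.filter (fun p =>
        p.2.any (fun q => (!(E q.1)) && !(q.1 == "")))).map
      (fun p => (p.1, p.2.filter (fun q => !(E q.1)))) := by
  induction mi generalizing acc with
  | nil => simp
  | cons m t ih =>
    simp only [List.foldl_cons, List.filter_cons]
    by_cases hc : (m.2.any (fun q => (!(E q.1)) && !(q.1 == ""))) = true
    · rw [if_pos (by rw [List.any_filter]; exact hc), if_pos hc, ih]
      simp [List.append_assoc]
    · rw [if_neg (by rw [List.any_filter]; exact hc), if_neg hc, ih]

-- ===== VERDICT (by name: the statement is the Claim_ definition above) =====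
theorem filter_exclusions_py_spec : Claim_equal_filter_exclusions_py := by
  intro mi ep _
  unfold Spec_filter_exclusions_py filter_exclusions_py filter_exclusions_py_alt
  simp only []
  rw [pv_loop (fun s => ((ep.foldl (fun d exc =>
      if exc == "" then d
      else d.modify (PySem.Str.len exc) [] (fun s => PySem.Set.add s exc)) PySem.Dict.empty).items.any
        (fun kv => PySem.Set.contains kv.2 (PySem.Str.slice s none (some kv.1)))))]
  simp only [pv_pred]
  rw [List.nil_append]
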